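-- pv_equiv track=rewrite | github.com/mRcSchwering/magic-soup | magicsoup/util.py | variants
-- ===== SOURCE A (Python) =====
-- from itertools import product
--
-- def variants(seq: str) -> list[str]:
--     """
--     Generate all possible nucleotide sequences from a template string.
--
--     Apart from nucleotides, the template string can include special characters:
--     - `N` refers to any nucleotide
--     - `R` refers to purines (A or G)
--     - `Y` refers to pyrimidines (C or T)
--     """
--
--     def apply(s: str, char: str, nts: tuple[str, ...]):
--         n = s.count(char)
--         for i in range(n):
--             idx = s.find(char)
--             s = s[:idx] + "{" + str(i) + "}" + s[idx + 1 :]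
--         ns = [nts] * n
--         return [s.format(*d) for d in product(*ns)]
--
--     seqs1 = apply(seq, "N", ("T", "C", "G", "A"))
--     seqs2 = [ss for s in seqs1 for ss in apply(s, "R", ("A", "G"))]
--     seqs3 = [ss for s in seqs2 for ss in apply(s, "Y", ("C", "T"))]
--     return seqs3
-- ===== SOURCE B (Python) =====
-- def variants(seq: str) -> list[str]:
--     """Same result as A, but built by direct expansion over the pieces of
--     s.split(char): no placeholder strings, no str.format, no itertools.product."""
--
--     def expand(s: str, char: str, nts: tuple[str, ...]) -> list[str]:
--         parts = s.split(char)
--         out = [parts[0]]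
--         for part in parts[1:]:
--             out = [pre + nt + part for pre in out for nt in nts]
--         return out
--
--     out = expand(seq, "N", ("T", "C", "G", "A"))
--     out = [u for t in out for u in expand(t, "R", ("A", "G"))]
--     return [v for u in out for v in expand(u, "Y", ("C", "T"))]
-- ===== Notes on version B (the rewrite author's own statement) =====
-- stated objective: simpler
-- what changed: B drops A's whole placeholder machinery (repeated str.count/str.find, rebuilding the string with '{i}' markers, itertools.product and str.format) and instead expands the pieces of s.split(char) directly, one pass per special letter.
-- outside the precondition, e.g. on variants('{'): A raises ValueError, B returns ['{']; on variants('}'): A raises ValueError, B returns ['}']; on variants('N{0}'): A returns ['TT', 'CC', 'GG', 'AA'], B returns ['T{0}', 'C{0}', 'G{0}', 'A{0}']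
import Mathlib
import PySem

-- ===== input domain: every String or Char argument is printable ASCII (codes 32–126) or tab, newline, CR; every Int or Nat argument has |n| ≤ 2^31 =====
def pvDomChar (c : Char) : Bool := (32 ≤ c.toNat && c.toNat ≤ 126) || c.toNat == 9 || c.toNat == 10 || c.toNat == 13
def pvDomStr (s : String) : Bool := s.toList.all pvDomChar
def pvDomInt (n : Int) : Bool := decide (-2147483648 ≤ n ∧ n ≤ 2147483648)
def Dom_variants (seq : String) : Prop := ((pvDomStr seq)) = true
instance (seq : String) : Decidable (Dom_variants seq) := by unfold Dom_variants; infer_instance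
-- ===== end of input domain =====

-- B replaces A's placeholder/format/product machinery by one direct right-to-left expansion
-- pass per special letter (objective: simpler); equal on every brace-free input (see Pre_).

-- ===== PORT A =====

-- int(ds) for a nonempty all-digit string ds (the index parsed by str.format; exact there)
def pvDecNat (ds : List Char) : Nat := ds.foldl (fun a c => a * 10 + (c.toNat - 48)) 0

-- s.format(*args): hand port, exact for templates whose braces occur only as "{<digits>}"
-- placeholders with index < len(args) — the only templates A's apply builds under Pre_.
def pvFormat : List Char → List (List Char) → List Char
  | [], _ => []
  | '{' :: rest, args =>
      let ds := rest.takeWhile (fun d => d.isDigit)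
      let after := rest.drop ds.length
      if after.head? = some '}' then (args.getD (pvDecNat ds) []) ++ pvFormat after.tail args
      else pvFormat after args  -- malformed placeholder: unreachable under Pre_
  | c :: rest, args => c :: pvFormat rest args
  termination_by cs _ => cs.length
  decreasing_by
  · have : (rest.drop (rest.takeWhile (fun d => d.isDigit)).length).tail.length ≤
        (rest.drop (rest.takeWhile (fun d => d.isDigit)).length).length := by
      simp
      omega
    have h2 : (rest.drop (rest.takeWhile (fun d => d.isDigit)).length).length ≤ rest.length := by
      simp
    simp only [List.length_cons]
    omega
  · have h2 : (rest.drop (rest.takeWhile (fun d => d.isDigit)).length).length ≤ rest.length := by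
      simp
    simp only [List.length_cons]
    omega
  · simp

-- itertools.product(*ns) (first factor varies slowest, exactly Python's order)
def pvProduct {α : Type} : List (List α) → List (List α)
  | [] => [[]]
  | xs :: rest => xs.flatMap (fun x => (pvProduct rest).map (x :: ·))

-- the inner helper `apply` of A, step for step
def pvApply (s : List Char) (ch : List Char) (nts : List (List Char)) : List (List Char) :=
  let n := PySem.Chars.count s ch
  let s' := (PySem.List.pyRange 0 (n : Int) 1).foldl (fun t i =>
      let idx := PySem.Chars.find t ch
      PySem.List.slice t none (some idx) ++ ('{' :: PySem.Int.toChars i) ++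
        ('}' :: PySem.List.slice t (some (idx + 1)) none)) s
  (pvProduct (List.replicate n nts)).map (fun d => pvFormat s' d)

def variants (seq : String) : List String :=
  let seqs1 := pvApply seq.toList ['N'] [['T'], ['C'], ['G'], ['A']]
  let seqs2 := seqs1.flatMap (fun s => pvApply s ['R'] [['A'], ['G']])
  let seqs3 := seqs2.flatMap (fun s => pvApply s ['Y'] [['C'], ['T']])
  seqs3.map (fun cs => String.ofList cs)

-- ===== PORT B =====

-- Source B's expand: split on the special character, then expand piece by piece
def pvExpand (s : List Char) (ch : Char) (nts : List (List Char)) : List (List Char) :=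
  match PySem.Chars.splitOn s [ch] with    -- s.split(char); splitOn is split? for sep ≠ ""
  | [] => []                               -- unreachable: split never returns an empty list
  | p0 :: rest =>                          -- out = [parts[0]]; for part in parts[1:]: ...
      rest.foldl (fun out part =>
        out.flatMap (fun pre => nts.map (fun nt => pre ++ nt ++ part))) [p0]

def variants_alt (seq : String) : List String :=
  let out1 := pvExpand seq.toList 'N' [['T'], ['C'], ['G'], ['A']]
  let out2 := out1.flatMap (fun t => pvExpand t 'R' [['A'], ['G']])
  let out3 := out2.flatMap (fun u => pvExpand u 'Y' [['C'], ['T']])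
  out3.map (fun cs => String.ofList cs)

-- ===== PRECONDITION & SPEC =====
-- Pre_ excludes seq containing '{' or '}': A feeds seq through str.format, which treats braces
-- as placeholder syntax and raises (ValueError/IndexError) on almost all such strings, and on the
-- rare ones where it still returns (e.g. 'N{0}') it consumes the braces as format syntax, a value
-- no brace-preserving reimplementation can match.
def Pre_variants (seq : String) : Prop := '{' ∉ seq.toList ∧ '}' ∉ seq.toList
instance (seq : String) : Decidable (Pre_variants seq) := by unfold Pre_variants; infer_instance

def pvWitness_variants : String := "ANRYG"

def Spec_variants (seq : String) (out : List String) : Prop := out = variants_alt seq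
instance (seq : String) (out : List String) : Decidable (Spec_variants seq out) := by unfold Spec_variants; infer_instance

-- ===== CLAIM (what is proved, stated in full; the proofs are below) =====
def Claim_equal_variants : Prop := ∀ (seq : String), Dom_variants seq → Pre_variants seq → Spec_variants seq (variants seq)

-- ===== LEMMAS AND PROOFS =====

-- ---- proof-level canonical expander (foldr over the characters) and B = canonical ----

def pvExpandR (s : List Char) (ch : Char) (nts : List (List Char)) : List (List Char) :=
  s.foldr (fun c out =>
      if c = ch then nts.flatMap (fun nt => out.map (nt ++ ·))
      else out.map (c :: ·)) [[]]

def pvParts (c : Char) : List Char → List (List Char)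
  | [] => [[]]
  | x :: r => if x = c then [] :: pvParts c r else (pvParts c r).modifyHead (x :: ·)

theorem pvParts_ne_nil (c : Char) (s : List Char) : pvParts c s ≠ [] := by
  cases s with
  | nil => simp [pvParts]
  | cons x r =>
    rw [pvParts]
    by_cases hx : x = c
    · simp [hx]
    · simp only [hx, if_false]
      intro h
      have := pvParts_ne_nil c r
      cases hp : pvParts c r with
      | nil => exact this hp
      | cons a b => rw [hp] at h; simp [List.modifyHead] at h

theorem pv_splitOn_go (c : Char) (fuel : Nat) (l cur : List Char) (acc : List (List Char))
    (h : l.length ≤ fuel) :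
    PySem.Chars.splitOn.go [c] fuel l cur acc
      = acc.reverse ++ (pvParts c l).modifyHead (cur.reverse ++ ·) := by
  induction fuel generalizing l cur acc with
  | zero =>
    have : l = [] := by cases l <;> simp_all
    subst this
    rw [PySem.Chars.splitOn.go]
    simp [pvParts]
  | succ f ih =>
    cases l with
    | nil =>
      rw [PySem.Chars.splitOn.go]
      · simp [pvParts]
      · omega
    | cons x t =>
      by_cases hx : x = c
      · subst hx
        rw [PySem.Chars.splitOn.go]
        simp only [List.isPrefixOf, beq_self_eq_true, Bool.true_and, if_pos]
        rw [show List.drop [x].length (x :: t) = t from rfl]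
        rw [ih t [] (cur.reverse :: acc) (by simpa using Nat.le_of_succ_le_succ h)]
        rw [pvParts, if_pos rfl]
        cases hp : pvParts x t with
        | nil => exact absurd hp (pvParts_ne_nil x t)
        | cons a b => simp
      · rw [PySem.Chars.splitOn.go]
        have hpre : [c].isPrefixOf (x :: t) = false := by
          simp [List.isPrefixOf]
          exact fun hh => (hx hh.symm).elim
        rw [hpre]
        simp only [Bool.false_eq_true, if_false]
        rw [ih t (x :: cur) acc (by simpa using Nat.le_of_succ_le_succ h)]
        rw [pvParts, if_neg hx]
        congr 1
        cases hp : pvParts c t with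
        | nil => exact absurd hp (pvParts_ne_nil c t)
        | cons a b => simp [List.modifyHead]

theorem pv_splitOn_char (c : Char) (s : List Char) :
    PySem.Chars.splitOn s [c] = pvParts c s := by
  rw [PySem.Chars.splitOn]
  rw [pv_splitOn_go c (s.length + 1) s [] [] (by omega)]
  cases hp : pvParts c s with
  | nil => exact absurd hp (pvParts_ne_nil c s)
  | cons a b => simp [List.modifyHead]

theorem pv_foldl_exp_map (nts : List (List Char)) (rest : List (List Char))
    (out : List (List Char)) (a : List Char) :
    rest.foldl (fun out part =>
        out.flatMap (fun pre => nts.map (fun nt => pre ++ nt ++ part))) (out.map (a ++ ·))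
      = (rest.foldl (fun out part =>
          out.flatMap (fun pre => nts.map (fun nt => pre ++ nt ++ part))) out).map (a ++ ·) := by
  induction rest generalizing out with
  | nil => rfl
  | cons part rest ih =>
    rw [List.foldl_cons, List.foldl_cons, ← ih]
    congr 1
    rw [List.flatMap_map, List.map_flatMap]
    congr 1
    funext pre
    rw [List.map_map]
    congr 1
    funext nt
    simp

theorem pv_foldl_exp_append (nts : List (List Char)) (rest : List (List Char))
    (o1 o2 : List (List Char)) :
    rest.foldl (fun out part =>
        out.flatMap (fun pre => nts.map (fun nt => pre ++ nt ++ part))) (o1 ++ o2)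
      = rest.foldl (fun out part =>
          out.flatMap (fun pre => nts.map (fun nt => pre ++ nt ++ part))) o1
        ++ rest.foldl (fun out part =>
          out.flatMap (fun pre => nts.map (fun nt => pre ++ nt ++ part))) o2 := by
  induction rest generalizing o1 o2 with
  | nil => rfl
  | cons part rest ih =>
    rw [List.foldl_cons, List.foldl_cons, List.foldl_cons, List.flatMap_append, ih]

theorem pv_foldl_exp_flatMap (nts : List (List Char)) (rest : List (List Char))
    (l : List (List Char)) (g : List Char → List (List Char)) :
    rest.foldl (fun out part =>
        out.flatMap (fun pre => nts.map (fun nt => pre ++ nt ++ part))) (l.flatMap g)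
      = l.flatMap (fun x => rest.foldl (fun out part =>
          out.flatMap (fun pre => nts.map (fun nt => pre ++ nt ++ part))) (g x)) := by
  induction l with
  | nil =>
    rw [List.flatMap_nil, List.flatMap_nil]
    induction rest with
    | nil => rfl
    | cons part rest ih => rw [List.foldl_cons]; simpa using ih
  | cons x t ih =>
    rw [List.flatMap_cons, List.flatMap_cons, pv_foldl_exp_append, ih]

theorem pv_single_flat (nts : List (List Char)) (p0 : List Char) :
    ([([] : List Char)].flatMap (fun pre => nts.map (fun nt => pre ++ nt ++ p0)))
      = nts.flatMap (fun nt => [nt ++ p0]) := by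
  induction nts with
  | nil => rfl
  | cons a t iht => simp_all

theorem pv_expand_eq_expandR (s : List Char) (c : Char) (nts : List (List Char)) :
    pvExpand s c nts = pvExpandR s c nts := by
  rw [pvExpand, pv_splitOn_char]
  induction s with
  | nil => simp [pvParts, pvExpandR]
  | cons x r ih =>
    rw [pvParts]
    unfold pvExpandR
    rw [List.foldr_cons]
    show _ = (if x = c then nts.flatMap (fun nt => (pvExpandR r c nts).map (nt ++ ·))
        else (pvExpandR r c nts).map (x :: ·))
    by_cases hx : x = c
    · rw [if_pos hx, if_pos hx]
      cases hp : pvParts c r with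
      | nil => exact absurd hp (pvParts_ne_nil c r)
      | cons p0 rest =>
        rw [hp] at ih
        have ih' : List.foldl (fun out part =>
            out.flatMap (fun pre => nts.map (fun nt => pre ++ nt ++ part))) [p0] rest
            = pvExpandR r c nts := ih
        simp only [List.foldl_cons]
        rw [pv_single_flat nts p0, pv_foldl_exp_flatMap]
        rw [← ih']
        congr 1
        funext nt
        have : [nt ++ p0] = [p0].map (nt ++ ·) := by simp
        rw [this, pv_foldl_exp_map]
    · rw [if_neg hx, if_neg hx]
      cases hp : pvParts c r with
      | nil => exact absurd hp (pvParts_ne_nil c r)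
      | cons p0 rest =>
        rw [hp] at ih
        have ih' : List.foldl (fun out part =>
            out.flatMap (fun pre => nts.map (fun nt => pre ++ nt ++ part))) [p0] rest
            = pvExpandR r c nts := ih
        simp only [List.modifyHead]
        have : [x :: p0] = [p0].map (fun t => [x] ++ t) := by simp
        rw [this, pv_foldl_exp_map, ← ih']
        simp



-- ---- Nat.toDigits 10: all characters are digits, and pvDecNat parses it back ----


theorem pv_toDigitsCore_acc (f n : Nat) (acc : List Char) :
    Nat.toDigitsCore 10 f n acc = Nat.toDigitsCore 10 f n [] ++ acc := by
  induction f generalizing n acc with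
  | zero => simp [Nat.toDigitsCore]
  | succ f ih =>
    simp only [Nat.toDigitsCore]
    by_cases h : n / 10 = 0
    · simp [h]
    · simp only [h, if_false]
      rw [ih (n/10) [Nat.digitChar (n % 10)], ih (n/10) (Nat.digitChar (n % 10) :: acc)]
      simp

theorem pv_toDigitsCore_fuel (n : Nat) : ∀ f f', n < f → n < f' →
    Nat.toDigitsCore 10 f n [] = Nat.toDigitsCore 10 f' n [] := by
  induction n using Nat.strong_induction_on with
  | _ n ih =>
    intro f f' hf hf'
    obtain ⟨a, rfl⟩ : ∃ a, f = a + 1 := ⟨f - 1, by omega⟩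
    obtain ⟨b, rfl⟩ : ∃ b, f' = b + 1 := ⟨f' - 1, by omega⟩
    simp only [Nat.toDigitsCore]
    by_cases h : n / 10 = 0
    · simp [h]
    · simp only [h, if_false]
      rw [pv_toDigitsCore_acc a, pv_toDigitsCore_acc b,
        ih (n / 10) (by omega) a b (by omega) (by omega)]

theorem pv_toDigitsCore_shape (n f : Nat) (h : n < f) :
    Nat.toDigitsCore 10 f n [] =
      (if n < 10 then [Nat.digitChar n]
       else Nat.toDigitsCore 10 (n / 10 + 1) (n / 10) [] ++ [Nat.digitChar (n % 10)]) := by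
  obtain ⟨a, rfl⟩ : ∃ a, f = a + 1 := ⟨f - 1, by omega⟩
  conv_lhs => rw [Nat.toDigitsCore]
  by_cases h10 : n < 10
  · have : n / 10 = 0 := Nat.div_eq_of_lt h10
    simp [this, h10, Nat.mod_eq_of_lt h10]
  · have hne : ¬ n / 10 = 0 := by omega
    simp only [hne, if_false, h10, if_false]
    rw [pv_toDigitsCore_acc]
    rw [pv_toDigitsCore_fuel (n / 10) a (n / 10 + 1) (by omega) (by omega)]

theorem pv_digitChar_isDigit (m : Nat) (h : m < 10) : (Nat.digitChar m).isDigit = true := by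
  interval_cases m <;> decide

theorem pv_digitChar_val (m : Nat) (h : m < 10) : (Nat.digitChar m).toNat - 48 = m := by
  interval_cases m <;> decide

theorem pv_toDigits_isDigit (n : Nat) : ∀ c ∈ Nat.toDigits 10 n, c.isDigit = true := by
  induction n using Nat.strong_induction_on with
  | _ n ih =>
    rw [Nat.toDigits, pv_toDigitsCore_shape n (n+1) (by omega)]
    by_cases h10 : n < 10
    · simp [h10, pv_digitChar_isDigit n h10]
    · simp only [h10, if_false]
      intro c hc
      rcases List.mem_append.1 hc with h | h
      · exact ih (n / 10) (by omega) c h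
      · simp at h
        subst h
        exact pv_digitChar_isDigit _ (Nat.mod_lt _ (by omega))

theorem pv_decNat_toDigits (n : Nat) : pvDecNat (Nat.toDigits 10 n) = n := by
  induction n using Nat.strong_induction_on with
  | _ n ih =>
    rw [Nat.toDigits, pv_toDigitsCore_shape n (n+1) (by omega)]
    by_cases h10 : n < 10
    · simp [h10, pvDecNat, pv_digitChar_val n h10]
    · simp only [h10, if_false]
      unfold pvDecNat
      rw [List.foldl_append]
      have := ih (n / 10) (by omega)
      unfold pvDecNat Nat.toDigits at this
      rw [this]
      simp [pv_digitChar_val _ (Nat.mod_lt _ (by omega : (0:Nat) < 10))]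
      omega

-- ---- unfolding lemmas for pvFormat ----

theorem pvFormat_nil (d : List (List Char)) : pvFormat [] d = [] := by rw [pvFormat]

theorem pvFormat_cons_ne (x : Char) (rest : List Char) (d : List (List Char)) (hx : x ≠ '{') :
    pvFormat (x :: rest) d = x :: pvFormat rest d := by
  rw [pvFormat.eq_def]
  split
  · simp_all
  · rename_i heq
    rw [List.cons.injEq] at heq
    exact absurd heq.1 hx
  · rename_i c r heq
    rw [List.cons.injEq] at heq
    obtain ⟨rfl, rfl⟩ := heq
    rfl

theorem pvFormat_placeholder (u tail : List Char) (d : List (List Char))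
    (hu : ∀ c ∈ u, c.isDigit = true) :
    pvFormat ('{' :: (u ++ '}' :: tail)) d = (d.getD (pvDecNat u) []) ++ pvFormat tail d := by
  have htake : (u ++ '}' :: tail).takeWhile (fun d => d.isDigit) = u := by
    rw [List.takeWhile_append_of_pos hu]
    simp [List.takeWhile]
  rw [pvFormat]
  simp only [htake, List.drop_left, List.head?_cons, List.tail_cons]
  simp

-- ---- single-character count and find ----

theorem pv_count_go (c : Char) (fuel : Nat) (l : List Char) (acc : Nat) (h : l.length ≤ fuel) :
    PySem.Chars.count.go [c] fuel l acc = acc + l.count c := by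
  induction fuel generalizing l acc with
  | zero =>
    have : l = [] := by cases l <;> simp_all
    subst this
    simp [PySem.Chars.count.go]
  | succ f ih =>
    cases l with
    | nil => simp [PySem.Chars.count.go]
    | cons x t =>
      by_cases hx : x = c
      · subst hx
        rw [PySem.Chars.count.go]
        simp only [List.isPrefixOf, beq_self_eq_true, Bool.true_and, if_pos]
        rw [show List.drop [x].length (x :: t) = t from rfl]
        rw [ih t (acc + 1) (by simpa using Nat.le_of_succ_le_succ h)]
        simp
        omega
      · rw [PySem.Chars.count.go]
        have hpre : [c].isPrefixOf (x :: t) = false := by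
          simp [List.isPrefixOf]
          exact fun hh => (hx hh.symm).elim
        rw [hpre]
        simp only [Bool.false_eq_true, if_false]
        rw [ih t acc (by simpa using Nat.le_of_succ_le_succ h)]
        simp [hx]

theorem pv_count_char (c : Char) (s : List Char) : PySem.Chars.count s [c] = s.count c := by
  rw [PySem.Chars.count]
  simp only [List.isEmpty_cons, Bool.false_eq_true, if_false]
  simpa using pv_count_go c s.length s 0 (le_refl _)

theorem pv_find_char (c : Char) (u v : List Char) (hu : c ∉ u) :
    PySem.Chars.find (u ++ c :: v) [c] = (u.length : Int) := by
  set s := u ++ c :: v with hs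
  have hmem : c ∈ s := by simp [hs]
  have hnn : 0 ≤ PySem.Chars.find s [c] :=
    (PySem.Chars.find_nonneg_iff s [c]).2 ((List.singleton_infix_iff c s).2 hmem)
  obtain ⟨hpref, hmin⟩ := PySem.Chars.find_spec hnn
  set m := (PySem.Chars.find s [c]).toNat with hm
  have hprefix_at : [c] <+: List.drop u.length s := by
    simp [hs]
  have hmle : m ≤ u.length := by
    by_contra hgt
    exact hmin u.length (by omega) hprefix_at
  have hmeq : m = u.length := by
    rcases Nat.lt_or_ge m u.length with hlt | hge
    · exfalso
      rcases hpref with ⟨t', ht'⟩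
      have hget : s[m]? = some c := by
        have : (List.drop m s)[0]? = some c := by rw [← ht']; rfl
        simpa using this
      have : u[m]? = some c := by
        rw [hs] at hget
        rwa [List.getElem?_append_left hlt] at hget
      exact hu (List.mem_of_getElem? this)
    · omega
  omega

-- ---- the template built by A's loop, and its formatted/substituted meaning ----

def pvTempl (c : Char) : List Char → Nat → List Char
  | [], _ => []
  | x :: r, k =>
      if x = c then '{' :: (Nat.toDigits 10 k ++ '}' :: pvTempl c r (k + 1))
      else x :: pvTempl c r k

def pvSubst (c : Char) : List Char → Nat → List (List Char) → List Char
  | [], _, _ => []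
  | x :: r, k, d =>
      if x = c then (d.getD k []) ++ pvSubst c r (k + 1) d
      else x :: pvSubst c r k d


theorem pv_templ_no_occ (c : Char) (s : List Char) (k : Nat) (h : c ∉ s) :
    pvTempl c s k = s := by
  induction s generalizing k with
  | nil => rfl
  | cons x r ih =>
    have hx : ¬ x = c := fun hh => h (hh ▸ List.mem_cons_self ..)
    simp [pvTempl, hx, ih k (fun hm => h (List.mem_cons_of_mem _ hm))]

theorem pv_subst_shift (c : Char) (s : List Char) (k : Nat) (a : List Char) (d : List (List Char)) :
    pvSubst c s (k + 1) (a :: d) = pvSubst c s k d := by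
  induction s generalizing k with
  | nil => rfl
  | cons x r ih =>
    by_cases hx : x = c <;> simp [pvSubst, hx, ih]

theorem pv_product_subst (c : Char) (nts : List (List Char)) (s : List Char) :
    (pvProduct (List.replicate (s.count c) nts)).map (fun d => pvSubst c s 0 d)
      = pvExpandR s c nts := by
  induction s with
  | nil => simp [pvProduct, pvExpandR, pvSubst]
  | cons x r ih =>
    by_cases hx : x = c
    · subst hx
      rw [List.count_cons_self, List.replicate_succ]
      show (pvProduct (_ :: _)).map _ = _
      rw [pvProduct]
      rw [List.map_flatMap]
      unfold pvExpandR
      rw [List.foldr_cons, if_pos rfl]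
      show _ = nts.flatMap (fun nt => (pvExpandR r x nts).map (nt ++ ·))
      rw [← ih]
      congr 1
      funext nt
      rw [List.map_map, List.map_map]
      congr 1
      funext d
      show pvSubst x (x :: r) 0 (nt :: d) = nt ++ pvSubst x r 0 d
      rw [pvSubst, if_pos rfl]
      simp [pv_subst_shift]
    · rw [List.count_cons_of_ne (by exact fun hh => hx hh) ]
      unfold pvExpandR
      rw [List.foldr_cons, if_neg hx]
      show _ = (pvExpandR r c nts).map (x :: ·)
      rw [← ih, List.map_map]
      congr 1
      funext d
      show pvSubst c (x :: r) 0 d = x :: pvSubst c r 0 d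
      rw [pvSubst, if_neg hx]

theorem pv_format_templ (c : Char) (hc : c.isDigit = false)
    (s : List Char) (k : Nat) (d : List (List Char)) (hs1 : '{' ∉ s) (hs2 : '}' ∉ s) :
    pvFormat (pvTempl c s k) d = pvSubst c s k d := by
  induction s generalizing k with
  | nil => rw [pvTempl, pvSubst, pvFormat_nil]
  | cons x r ih =>
    have hx1 : x ≠ '{' := fun hh => hs1 (hh ▸ List.mem_cons_self ..)
    have hr1 : '{' ∉ r := fun hm => hs1 (List.mem_cons_of_mem _ hm)
    have hr2 : '}' ∉ r := fun hm => hs2 (List.mem_cons_of_mem _ hm)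
    by_cases hxc : x = c
    · subst hxc
      rw [pvTempl, if_pos rfl, pvSubst, if_pos rfl]
      rw [pvFormat_placeholder _ _ _ (pv_toDigits_isDigit k)]
      rw [pv_decNat_toDigits, ih (k+1) hr1 hr2]
    · rw [pvTempl, if_neg hxc, pvSubst, if_neg hxc]
      rw [pvFormat_cons_ne _ _ _ hx1, ih k hr1 hr2]

theorem pv_templ_append (c : Char) (a r : List Char) (k : Nat) (ha : c ∉ a) :
    pvTempl c (a ++ c :: r) k = a ++ '{' :: (Nat.toDigits 10 k ++ '}' :: pvTempl c r (k + 1)) := by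
  induction a with
  | nil => simp [pvTempl]
  | cons x t ih =>
    have hx : ¬ x = c := fun hh => ha (hh ▸ List.mem_cons_self ..)
    simp only [List.cons_append, pvTempl, hx, if_false]
    rw [ih (fun hm => ha (List.mem_cons_of_mem _ hm))]

theorem pv_first_occ (c : Char) (s : List Char) (h : c ∈ s) :
    ∃ a r, s = a ++ c :: r ∧ c ∉ a := by
  induction s with
  | nil => cases h
  | cons x t ih =>
    by_cases hx : x = c
    · exact ⟨[], t, by simp [hx], by simp⟩
    · obtain ⟨a, r, rfl, ha⟩ := ih (by rcases List.mem_cons.1 h with h | h; exact absurd h.symm hx; exact h)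
      refine ⟨x :: a, r, by simp, ?_⟩
      intro hm
      rcases List.mem_cons.1 hm with hh | hh
      · exact hx hh.symm
      · exact ha hh

theorem pv_loop_eq_templ (c : Char) (hc : c.isDigit = false) (hcb : c ≠ '{') (hcb' : c ≠ '}')
    (n : Nat) (pre suf : List Char) (k0 : Nat)
    (hpre : c ∉ pre) (hn : suf.count c = n) :
    ((List.range n).map (fun j => ((k0 + j : Nat) : Int))).foldl (fun t i =>
        PySem.List.slice t none (some (PySem.Chars.find t [c])) ++ ('{' :: PySem.Int.toChars i) ++
          ('}' :: PySem.List.slice t (some (PySem.Chars.find t [c] + 1)) none)) (pre ++ suf)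
      = pre ++ pvTempl c suf k0 := by
  induction n generalizing pre suf k0 with
  | zero =>
    have : c ∉ suf := by
      intro hm
      have := List.count_pos_iff.2 hm
      omega
    simp [pv_templ_no_occ c suf k0 this]
  | succ n ih =>
    have hmem : c ∈ suf := by
      have : 0 < suf.count c := by omega
      exact List.count_pos_iff.1 this
    obtain ⟨a, r, rfl, ha⟩ := pv_first_occ c suf hmem
    have hfind : PySem.Chars.find (pre ++ (a ++ c :: r)) [c] = ((pre ++ a).length : Int) := by
      rw [← List.append_assoc]
      exact pv_find_char c (pre ++ a) r (by simp [hpre, ha])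
    rw [List.range_succ_eq_map, List.map_cons, List.foldl_cons]
    -- simplify the first step
    have hstep :
        (PySem.List.slice (pre ++ (a ++ c :: r)) none (some (PySem.Chars.find (pre ++ (a ++ c :: r)) [c])) ++
           ('{' :: PySem.Int.toChars ((k0 + 0 : Nat) : Int)) ++
           ('}' :: PySem.List.slice (pre ++ (a ++ c :: r)) (some (PySem.Chars.find (pre ++ (a ++ c :: r)) [c] + 1)) none))
        = (pre ++ a ++ '{' :: Nat.toDigits 10 k0 ++ ['}']) ++ r := by
      simp only [hfind]
      have h1 : PySem.List.slice (pre ++ (a ++ c :: r)) none (some ((pre ++ a).length : Int))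
          = pre ++ a := by
        rw [PySem.List.slice_to_natCast, ← List.append_assoc, List.take_left]
      have h2 : PySem.List.slice (pre ++ (a ++ c :: r)) (some (((pre ++ a).length : Int) + 1)) none
          = r := by
        have hcast : (((pre ++ a).length : Int) + 1) = (((pre ++ a).length + 1 : Nat) : Int) := by
          push_cast; ring
        rw [hcast, PySem.List.slice_from_natCast]
        rw [show pre ++ (a ++ c :: r) = (pre ++ a ++ [c]) ++ r by simp]
        rw [List.drop_left' (by simp; omega)]
      rw [h1, h2]
      have : PySem.Int.toChars ((k0 + 0 : Nat) : Int) = Nat.toDigits 10 k0 := by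
        simp [PySem.Int.toChars]
      rw [this]
      simp
    rw [hstep]
    have hmap : (List.range n).map ((fun j => ((k0 + j : Nat) : Int)) ∘ Nat.succ)
        = (List.range n).map (fun j => (((k0 + 1) + j : Nat) : Int)) := by
      apply List.map_congr_left
      intro j _
      simp only [Function.comp]
      congr 1
      omega
    rw [List.map_map, hmap]
    have hdig : c ∉ Nat.toDigits 10 k0 := by
      intro hm
      have := pv_toDigits_isDigit k0 c hm
      rw [hc] at this
      cases this
    have hpre' : c ∉ pre ++ a ++ '{' :: Nat.toDigits 10 k0 ++ ['}'] := by
      intro hm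
      simp only [List.mem_append, List.mem_cons] at hm
      tauto
    rw [ih _ _ (k0 + 1) hpre' (by rw [List.count_append, List.count_cons_self, List.count_eq_zero_of_not_mem ha] at hn; omega)]
    rw [pv_templ_append c a r k0 ha]
    simp

theorem pv_apply_eq_expand (c : Char) (hc : c.isDigit = false) (hcb : c ≠ '{') (hcb2 : c ≠ '}')
    (nts : List (List Char)) (s : List Char) (hs1 : '{' ∉ s) (hs2 : '}' ∉ s) :
    pvApply s [c] nts = pvExpandR s c nts := by
  simp only [pvApply]
  rw [pv_count_char]
  rw [PySem.List.pyRange_zero_natCast]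
  have hmap : List.map (fun k : Nat => (k : Int)) (List.range (s.count c))
      = List.map (fun j : Nat => ((0 + j : Nat) : Int)) (List.range (s.count c)) := by
    apply List.map_congr_left
    intro j _
    simp
  rw [hmap]
  have hloop := pv_loop_eq_templ c hc hcb hcb2 (s.count c) [] s 0 (by simp) rfl
  simp only [List.nil_append] at hloop
  rw [hloop]
  have hsub : ∀ d, pvFormat (pvTempl c s 0) d = pvSubst c s 0 d :=
    fun d => pv_format_templ c hc s 0 d hs1 hs2
  calc (pvProduct (List.replicate (s.count c) nts)).map (fun d => pvFormat (pvTempl c s 0) d)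
      = (pvProduct (List.replicate (s.count c) nts)).map (fun d => pvSubst c s 0 d) := by
        apply List.map_congr_left
        intro d _
        exact hsub d
    _ = pvExpandR s c nts := pv_product_subst c nts s

theorem pv_expand_braceless (s : List Char) (c : Char) (nts : List (List Char)) (b : Char)
    (hs : b ∉ s) (hnts : ∀ nt ∈ nts, b ∉ nt) :
    ∀ t ∈ pvExpandR s c nts, b ∉ t := by
  induction s with
  | nil =>
    intro t ht
    simp [pvExpandR] at ht
    subst ht
    simp
  | cons x r ih =>
    have hxr : b ∉ r := fun hm => hs (List.mem_cons_of_mem _ hm)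
    have hbx : b ≠ x := fun hh => hs (hh ▸ List.mem_cons_self ..)
    intro t ht
    unfold pvExpandR at ht
    rw [List.foldr_cons] at ht
    by_cases hxc : x = c
    · rw [if_pos hxc] at ht
      obtain ⟨nt, hnt, t', ht', rfl⟩ := by
        simpa using List.mem_flatMap.1 ht
      intro hm
      rcases List.mem_append.1 hm with hm | hm
      · exact hnts nt hnt hm
      · exact ih hxr t' ht' hm
    · rw [if_neg hxc] at ht
      obtain ⟨t', ht', rfl⟩ := List.mem_map.1 ht
      intro hm
      rcases List.mem_cons.1 hm with hm | hm
      · exact hbx hm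
      · exact ih hxr t' ht' hm

theorem pv_flatMap_congr {α β : Type} (l : List α) (f g : α → List β)
    (h : ∀ x ∈ l, f x = g x) : l.flatMap f = l.flatMap g := by
  induction l with
  | nil => rfl
  | cons x t ih =>
    rw [List.flatMap_cons, List.flatMap_cons, h x (List.mem_cons_self ..),
      ih (fun y hy => h y (List.mem_cons_of_mem _ hy))]

-- ===== VERDICT (by name: the statement is the Claim_ definition above) =====
theorem variants_spec : Claim_equal_variants := by
  intro seq _ hpre
  obtain ⟨h1, h2⟩ := hpre
  simp only [Spec_variants, variants, variants_alt]
  simp only [pv_expand_eq_expandR]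
  have hNd : ('N').isDigit = false := by decide
  have hRd : ('R').isDigit = false := by decide
  have hYd : ('Y').isDigit = false := by decide
  have hA : pvApply seq.toList ['N'] [['T'], ['C'], ['G'], ['A']]
      = pvExpandR seq.toList 'N' [['T'], ['C'], ['G'], ['A']] :=
    pv_apply_eq_expand 'N' hNd (by decide) (by decide) _ seq.toList h1 h2
  rw [hA]
  have hbl1 := pv_expand_braceless seq.toList 'N' [['T'], ['C'], ['G'], ['A']] '{' h1 (by decide)
  have hbr1 := pv_expand_braceless seq.toList 'N' [['T'], ['C'], ['G'], ['A']] '}' h2 (by decide)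
  have hB : (pvExpandR seq.toList 'N' [['T'], ['C'], ['G'], ['A']]).flatMap
        (fun s => pvApply s ['R'] [['A'], ['G']])
      = (pvExpandR seq.toList 'N' [['T'], ['C'], ['G'], ['A']]).flatMap
        (fun s => pvExpandR s 'R' [['A'], ['G']]) := by
    apply pv_flatMap_congr
    intro s hsm
    exact pv_apply_eq_expand 'R' hRd (by decide) (by decide) _ s (hbl1 s hsm) (hbr1 s hsm)
  rw [hB]
  congr 1
  apply pv_flatMap_congr
  intro u hu
  obtain ⟨s, hsm, hum⟩ := List.mem_flatMap.1 hu
  have hul := pv_expand_braceless s 'R' [['A'], ['G']] '{' (hbl1 s hsm) (by decide) u hum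
  have hur := pv_expand_braceless s 'R' [['A'], ['G']] '}' (hbr1 s hsm) (by decide) u hum
  exact pv_apply_eq_expand 'Y' hYd (by decide) (by decide) _ u hul hur
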